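-- pv_equiv track=rewrite | github.com/Tawana2000/Python | Python Intermediate Challenges/diagonal-primes.py | is_prime_diagonal
-- ===== SOURCE A (Python) =====
-- def is_prime_diagonal(matrix):
--
--     if not matrix or len(matrix) != len(matrix[0]):
--         raise ValueError("Input must be a non-empty square matrix")
--
--     n = len(matrix)
--
--     for i in range(n):
--         num = matrix[i][i]
--         if num < 2:
--             return False
--         for j in range(2, int(num ** 0.5) + 1):
--             if num % j == 0:
--                 return False
--
--     return True
-- ===== SOURCE B (Python) =====
-- def is_prime_diagonal(matrix):
--     if not matrix or len(matrix) != len(matrix[0]):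
--         raise ValueError("Input must be a non-empty square matrix")
--     diag = [matrix[i][i] for i in range(len(matrix))]
--     if min(diag) < 2:
--         return False
--     r = int(max(diag) ** 0.5)
--     composites = set()
--     for p in range(2, int(r ** 0.5) + 1):
--         if p not in composites:
--             composites.update(range(p * p, r + 1, p))
--     primes = [p for p in range(2, r + 1) if p not in composites]
--     return all(all(v % p for p in primes if p * p <= v) for v in diag)
-- ===== Notes on version B (the rewrite author's own statement) =====
-- stated objective: alternative
-- what changed: A trial-divides each diagonal element independently; B first collects the diagonal, rejects on min < 2, builds one sieve-of-Eratosthenes prime table up to isqrt(max(diag)) and then tests every element by dividing only by the tabulated primes.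
-- outside the precondition, e.g. on is_prime_diagonal([[0, 1], [9]]): A returns False, B raises IndexError
import Mathlib
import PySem

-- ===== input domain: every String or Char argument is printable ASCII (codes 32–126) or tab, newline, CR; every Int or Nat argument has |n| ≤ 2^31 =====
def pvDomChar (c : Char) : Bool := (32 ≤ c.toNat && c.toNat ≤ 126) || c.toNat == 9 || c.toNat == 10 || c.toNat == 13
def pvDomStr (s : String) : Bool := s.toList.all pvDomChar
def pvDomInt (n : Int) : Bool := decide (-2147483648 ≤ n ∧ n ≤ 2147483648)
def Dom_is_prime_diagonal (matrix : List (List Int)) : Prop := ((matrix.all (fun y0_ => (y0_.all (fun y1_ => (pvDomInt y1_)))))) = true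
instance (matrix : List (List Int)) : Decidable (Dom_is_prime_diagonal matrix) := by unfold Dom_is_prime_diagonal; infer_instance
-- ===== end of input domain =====

-- B replaces A's independent trial division per diagonal element by one sieve-built prime
-- table up to isqrt(max(diag)) shared by all elements (alternative decomposition, same values).

-- ===== PORT A =====
-- int(x ** 0.5): exact integer square root for 0 ≤ x ≤ 2^31 (double sqrt truncates to isqrt there)
def pvIsqrt (x : Int) : Int := (Nat.sqrt x.toNat : Int)

-- inner loop 'for j in range(2, int(num**0.5)+1): if num % j == 0: return False' (early return ⇒ .all)
def pvTrialA (num : Int) : Bool :=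
  (PySem.List.pyRange 2 (pvIsqrt num + 1) 1).all (fun j => !(PySem.Int.mod num j == 0))

def is_prime_diagonal (matrix : List (List Int)) : Bool :=
  if matrix = [] ∨ matrix.length ≠ (matrix.headD []).length then
    false  -- Python raises ValueError here; outside Pre_
  else
    (List.range matrix.length).all (fun i =>
      let num := (matrix.getD i []).getD i 0  -- matrix[i][i]; exact under Pre_ (index in range)
      if num < 2 then false else pvTrialA num)

-- ===== PORT B =====
def is_prime_diagonal_alt (matrix : List (List Int)) : Bool :=
  if matrix = [] ∨ matrix.length ≠ (matrix.headD []).length then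
    false  -- Python raises ValueError here; outside Pre_
  else
    let diag := (List.range matrix.length).map (fun i => (matrix.getD i []).getD i 0)  -- matrix[i][i]; exact under Pre_
    match PySem.List.min? diag (fun x => x) with
    | none => false  -- unreachable: diag is nonempty
    | some m =>
      if m < 2 then false
      else
        match PySem.List.max? diag (fun x => x) with
        | none => false  -- unreachable: diag is nonempty
        | some mx =>
          let r := pvIsqrt mx
          let comps := (PySem.List.pyRange 2 (pvIsqrt r + 1) 1).foldl
            (fun comps p =>
              if PySem.Set.contains comps p then comps
              else PySem.Set.update comps (PySem.List.pyRange (p * p) (r + 1) p))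
            PySem.Set.empty
          let primes := (PySem.List.pyRange 2 (r + 1) 1).filter
            (fun p => !(PySem.Set.contains comps p))
          diag.all (fun v =>
            ((primes.filter (fun p => decide (p * p ≤ v))).all
              (fun p => !(PySem.Int.mod v p == 0))))

-- ===== PRECONDITION & SPEC =====
-- Pre_ excludes empty and non-square matrices (A raises ValueError) and ragged matrices whose
-- row i is shorter than i+1, where A either raises IndexError or returns False only by the
-- accident of its scan stopping before the short row.
def Pre_is_prime_diagonal (matrix : List (List Int)) : Prop :=
  matrix ≠ [] ∧ matrix.length = (matrix.headD []).length ∧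
    ∀ i, i < matrix.length → i < (matrix.getD i []).length
instance (matrix : List (List Int)) : Decidable (Pre_is_prime_diagonal matrix) := by
  unfold Pre_is_prime_diagonal; infer_instance

def pvWitness_is_prime_diagonal : List (List Int) := [[2, 3], [5, 7]]

def Spec_is_prime_diagonal (matrix : List (List Int)) (out : Bool) : Prop := out = is_prime_diagonal_alt matrix
instance (matrix : List (List Int)) (out : Bool) : Decidable (Spec_is_prime_diagonal matrix out) := by unfold Spec_is_prime_diagonal; infer_instance

-- ===== CLAIM (what is proved, stated in full; the proofs are below) =====
def Claim_equal_is_prime_diagonal : Prop := ∀ (matrix : List (List Int)), Dom_is_prime_diagonal matrix → Pre_is_prime_diagonal matrix → Spec_is_prime_diagonal matrix (is_prime_diagonal matrix)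

-- ===== LEMMAS AND PROOFS =====

-- "v has a divisor d with 2 ≤ d and d² ≤ v" — the condition A's inner loop tests
def IComp (v : Int) : Prop := ∃ d : Int, 2 ≤ d ∧ d * d ≤ v ∧ d ∣ v

-- the sieve step and the finished sieve of B (proof-side names for the inline code of the port)
def pvStep (r : Int) (comps : PySem.Set Int) (p : Int) : PySem.Set Int :=
  if PySem.Set.contains comps p then comps
  else PySem.Set.update comps (PySem.List.pyRange (p * p) (r + 1) p)

def pvSieve (r : Int) : PySem.Set Int :=
  (PySem.List.pyRange 2 (pvIsqrt r + 1) 1).foldl (pvStep r) PySem.Set.empty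

def pvPrimes (r : Int) : List Int :=
  (PySem.List.pyRange 2 (r + 1) 1).filter (fun p => !(PySem.Set.contains (pvSieve r) p))

lemma pv_all_congr {α : Type} (l : List α) (f g : α → Bool) (h : ∀ x ∈ l, f x = g x) :
    l.all f = l.all g := by
  induction l with
  | nil => rfl
  | cons x t ih =>
    simp only [List.all_cons, h x List.mem_cons_self,
      ih (fun y hy => h y (List.mem_cons_of_mem _ hy))]

lemma pv_le_isqrt_iff (d v : Int) (hd : 0 ≤ d) (hv : 0 ≤ v) :
    d ≤ pvIsqrt v ↔ d * d ≤ v := by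
  unfold pvIsqrt
  constructor
  · intro h
    have h' : d.toNat ≤ Nat.sqrt v.toNat := by omega
    have h2 := Nat.le_sqrt.mp h'
    have h3 : ((d.toNat * d.toNat : Nat) : Int) ≤ ((v.toNat : Nat) : Int) := by exact_mod_cast h2
    push_cast at h3
    rwa [Int.toNat_of_nonneg hd, Int.toNat_of_nonneg hv] at h3
  · intro h
    have h3 : ((d.toNat * d.toNat : Nat) : Int) ≤ ((v.toNat : Nat) : Int) := by
      push_cast
      rwa [Int.toNat_of_nonneg hd, Int.toNat_of_nonneg hv]
    have h2 : d.toNat ≤ Nat.sqrt v.toNat := Nat.le_sqrt.mpr (by exact_mod_cast h3)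
    omega

-- among the small divisors of m there is a least one, and it has no small divisor itself
lemma pv_least_nat (m : Nat) : ∀ d : Nat, 2 ≤ d → d * d ≤ m → d ∣ m →
    ∃ p : Nat, 2 ≤ p ∧ p * p ≤ m ∧ p ∣ m ∧ ∀ e, 2 ≤ e → e * e ≤ p → ¬ e ∣ p := by
  intro d
  induction d using Nat.strong_induction_on with
  | _ d ih =>
    intro h2 hdd hdvd
    by_cases hc : ∃ e, 2 ≤ e ∧ e * e ≤ d ∧ e ∣ d
    · obtain ⟨e, he2, hee, hedvd⟩ := hc
      have hed : e < d := by nlinarith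
      exact ih e hed he2 (by nlinarith) (hedvd.trans hdvd)
    · exact ⟨d, h2, hdd, hdvd, fun e he hee hdv => hc ⟨e, he, hee, hdv⟩⟩

lemma pv_icomp_natCast (n : Nat) :
    IComp (n : Int) ↔ ∃ d : Nat, 2 ≤ d ∧ d * d ≤ n ∧ d ∣ n := by
  constructor
  · rintro ⟨d, h2, hdd, hdvd⟩
    have hd : ((d.toNat : Nat) : Int) = d := Int.toNat_of_nonneg (by omega)
    refine ⟨d.toNat, by omega, ?_, ?_⟩
    · have : ((d.toNat * d.toNat : Nat) : Int) ≤ (n : Int) := by push_cast; rw [hd]; exact hdd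
      exact_mod_cast this
    · rw [← hd] at hdvd; exact_mod_cast hdvd
  · rintro ⟨d, h2, hdd, hdvd⟩
    exact ⟨(d : Int), by exact_mod_cast h2, by exact_mod_cast hdd, by exact_mod_cast hdvd⟩

lemma pv_least_int (v : Int) (hv : 2 ≤ v) (h : IComp v) :
    ∃ p : Int, 2 ≤ p ∧ p * p ≤ v ∧ p ∣ v ∧ ¬ IComp p := by
  have hvcast : ((v.toNat : Nat) : Int) = v := Int.toNat_of_nonneg (by omega)
  obtain ⟨dN, hd2, hddN, hdvdN⟩ := (pv_icomp_natCast v.toNat).mp (by rwa [hvcast])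
  obtain ⟨p, hp2, hpp, hpd, hpleast⟩ := pv_least_nat v.toNat dN hd2 hddN hdvdN
  refine ⟨(p : Int), by exact_mod_cast hp2, ?_, ?_, ?_⟩
  · have h1 : ((p * p : Nat) : Int) ≤ ((v.toNat : Nat) : Int) := by exact_mod_cast hpp
    rw [hvcast] at h1; exact_mod_cast h1
  · have h1 : ((p : Nat) : Int) ∣ ((v.toNat : Nat) : Int) := by exact_mod_cast hpd
    rwa [hvcast] at h1
  · intro hc
    obtain ⟨e, he2, hee, hedvd⟩ := (pv_icomp_natCast p).mp hc
    exact hpleast e he2 hee hedvd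

lemma pv_trialA_iff (v : Int) (hv : 0 ≤ v) : pvTrialA v = true ↔ ¬ IComp v := by
  unfold pvTrialA
  rw [List.all_eq_true]
  constructor
  · rintro h ⟨d, h2, hdd, hdvd⟩
    have hd : d ∈ PySem.List.pyRange 2 (pvIsqrt v + 1) 1 :=
      PySem.List.mem_pyRange_one.mpr ⟨h2, by
        have := (pv_le_isqrt_iff d v (by omega) hv).mpr hdd; omega⟩
    have := h d hd
    rw [Bool.not_eq_eq_eq_not, Bool.not_true, beq_eq_false_iff_ne] at this
    exact this ((PySem.Int.mod_eq_zero_iff_dvd v d).mpr hdvd)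
  · intro h j hj
    rw [PySem.List.mem_pyRange_one] at hj
    rw [Bool.not_eq_eq_eq_not, Bool.not_true, beq_eq_false_iff_ne]
    intro hmod
    exact h ⟨j, hj.1, (pv_le_isqrt_iff j v (by omega) hv).mp (by omega),
      (PySem.Int.mod_eq_zero_iff_dvd v j).mp hmod⟩

lemma pvStep_of_not_mem {r : Int} {s : PySem.Set Int} {p : Int} (h : ¬ PySem.Set.contains s p = true) :
    pvStep r s p = PySem.Set.update s (PySem.List.pyRange (p * p) (r + 1) p) := by
  unfold pvStep; rw [if_neg h]

lemma pv_sieve_mono (r : Int) (ps : List Int) :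
    ∀ s : PySem.Set Int, ∀ x ∈ s, x ∈ ps.foldl (pvStep r) s := by
  induction ps with
  | nil => intro s x hx; simpa using hx
  | cons p ps ih =>
    intro s x hx
    rw [List.foldl_cons]
    apply ih
    unfold pvStep
    split
    · exact hx
    · exact (PySem.Set.mem_update _ _ _).mpr (Or.inl hx)

lemma pv_sieve_sound (r : Int) (ps : List Int) (hps : ∀ p ∈ ps, 2 ≤ p) :
    ∀ s : PySem.Set Int, (∀ m ∈ s, IComp m ∧ m ≤ r) →
    ∀ m ∈ ps.foldl (pvStep r) s, IComp m ∧ m ≤ r := by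
  induction ps with
  | nil => intro s hs m hm; exact hs m (by simpa using hm)
  | cons p ps ih =>
    intro s hs m hm
    rw [List.foldl_cons] at hm
    refine ih (fun q hq => hps q (List.mem_cons_of_mem _ hq)) _ ?_ m hm
    intro q hq
    unfold pvStep at hq
    split at hq
    · exact hs q hq
    · rcases (PySem.Set.mem_update _ _ _).mp hq with h | h
      · exact hs q h
      · have hp2 : 2 ≤ p := hps p List.mem_cons_self
        obtain ⟨hqlo, hqhi, hdvd⟩ := (PySem.List.mem_pyRange_iff_of_pos (by omega) q).mp h
        refine ⟨⟨p, hp2, hqlo, ?_⟩, by omega⟩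
        have : p ∣ (q - p * p) + p * p := dvd_add hdvd (dvd_mul_right p p)
        simpa using this

lemma pv_sieve_complete (r m : Int) (hm2 : 2 ≤ m) (hmr : m ≤ r) (h : IComp m) :
    m ∈ pvSieve r := by
  obtain ⟨p, hp2, hpp, hpd, hpnc⟩ := pv_least_int m hm2 h
  have hr0 : (0 : Int) ≤ r := by omega
  have hpr : p ≤ pvIsqrt r := (pv_le_isqrt_iff p r (by omega) hr0).mpr (le_trans hpp hmr)
  unfold pvSieve
  rw [PySem.List.pyRange_one_append 2 p (pvIsqrt r + 1) hp2 (by omega),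
    PySem.List.pyRange_one_append p (p + 1) (pvIsqrt r + 1) (by omega) (by omega),
    PySem.List.pyRange_one_singleton p]
  rw [List.foldl_append, List.foldl_append, List.foldl_cons, List.foldl_nil]
  apply pv_sieve_mono
  have hs0 : ∀ q ∈ (PySem.List.pyRange 2 p 1).foldl (pvStep r) PySem.Set.empty, IComp q ∧ q ≤ r :=
    pv_sieve_sound r _ (fun q hq => (PySem.List.mem_pyRange_one.mp hq).1) _
      (by intro q hq; simp [PySem.Set.empty] at hq)
  have hpns : ¬ (PySem.Set.contains ((PySem.List.pyRange 2 p 1).foldl (pvStep r) PySem.Set.empty) p = true) := by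
    rw [PySem.Set.contains_iff]
    intro hmem
    exact hpnc (hs0 p hmem).1
  rw [pvStep_of_not_mem hpns, PySem.Set.mem_update]
  right
  rw [PySem.List.mem_pyRange_iff_of_pos (by omega)]
  exact ⟨hpp, by omega, by simpa using dvd_sub hpd (dvd_mul_right p p)⟩

lemma pv_mem_primes_iff (r p : Int) : p ∈ pvPrimes r ↔ 2 ≤ p ∧ p ≤ r ∧ ¬ IComp p := by
  unfold pvPrimes
  rw [List.mem_filter, PySem.List.mem_pyRange_one]
  constructor
  · rintro ⟨⟨h2, hr⟩, hnc⟩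
    refine ⟨h2, by omega, fun hc => ?_⟩
    have hmem := pv_sieve_complete r p h2 (by omega) hc
    rw [Bool.not_eq_eq_eq_not, Bool.not_true] at hnc
    rw [← PySem.Set.contains_iff _ p] at hmem
    rw [hnc] at hmem
    exact Bool.false_ne_true hmem
  · rintro ⟨h2, hr, hnc⟩
    refine ⟨⟨h2, by omega⟩, ?_⟩
    rw [Bool.not_eq_eq_eq_not, Bool.not_true]
    by_contra hcon
    have hmem : p ∈ pvSieve r := (PySem.Set.contains_iff _ p).mp (by
      cases hcc : PySem.Set.contains (pvSieve r) p with
      | false => exact absurd hcc hcon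
      | true => rfl)
    exact hnc (pv_sieve_sound r _ (fun q hq => (PySem.List.mem_pyRange_one.mp hq).1) _
      (by intro q hq; simp [PySem.Set.empty] at hq) p hmem).1

lemma pv_elem_eq (mx v : Int) (h2 : 2 ≤ v) (hvmx : v ≤ mx) :
    (if v < 2 then false else pvTrialA v) =
      ((pvPrimes (pvIsqrt mx)).filter (fun p => decide (p * p ≤ v))).all
        (fun p => !(PySem.Int.mod v p == 0)) := by
  rw [if_neg (by omega)]
  rw [Bool.eq_iff_iff]
  rw [pv_trialA_iff v (by omega), List.all_eq_true]
  constructor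
  · intro hnc p hp
    rw [List.mem_filter, decide_eq_true_eq] at hp
    obtain ⟨hpmem, hple⟩ := hp
    rw [pv_mem_primes_iff] at hpmem
    rw [Bool.not_eq_eq_eq_not, Bool.not_true, beq_eq_false_iff_ne]
    intro hmod
    exact hnc ⟨p, hpmem.1, hple, (PySem.Int.mod_eq_zero_iff_dvd v p).mp hmod⟩
  · intro hall hc
    obtain ⟨p, hp2, hpp, hpd, hpnc⟩ := pv_least_int v h2 hc
    have hpr : p ≤ pvIsqrt mx := (pv_le_isqrt_iff p mx (by omega) (by omega)).mpr (le_trans hpp hvmx)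
    have hpmem : p ∈ (pvPrimes (pvIsqrt mx)).filter (fun p => decide (p * p ≤ v)) :=
      List.mem_filter.mpr ⟨(pv_mem_primes_iff _ p).mpr ⟨hp2, hpr, hpnc⟩, by
        rw [decide_eq_true_eq]; exact hpp⟩
    have := hall p hpmem
    rw [Bool.not_eq_eq_eq_not, Bool.not_true, beq_eq_false_iff_ne] at this
    exact this ((PySem.Int.mod_eq_zero_iff_dvd v p).mpr hpd)

-- ===== VERDICT (by name: the statement is the Claim_ definition above) =====
theorem is_prime_diagonal_spec : Claim_equal_is_prime_diagonal := by
  intro matrix _ hpre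
  obtain ⟨hne, hsq, _⟩ := hpre
  unfold Spec_is_prime_diagonal is_prime_diagonal is_prime_diagonal_alt
  have hguard : ¬ (matrix = [] ∨ matrix.length ≠ (matrix.headD []).length) := by
    push Not; exact ⟨hne, hsq⟩
  rw [if_neg hguard, if_neg hguard]
  set diag := (List.range matrix.length).map (fun i => (matrix.getD i []).getD i 0) with hdiag
  have hA : (List.range matrix.length).all (fun i =>
      let num := (matrix.getD i []).getD i 0
      if num < 2 then false else pvTrialA num) =
      diag.all (fun v => if v < 2 then false else pvTrialA v) := by
    rw [hdiag, List.all_map]; rfl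
  rw [hA]
  have hdne : diag ≠ [] := by
    intro hnil
    have := congrArg List.length hnil
    simp [hdiag] at this
    exact hne this
  cases hmin : PySem.List.min? diag (fun x => x) with
  | none => exact absurd ((PySem.List.min?_eq_none_iff diag _).mp hmin) hdne
  | some m =>
    have hmmem := PySem.List.min?_mem hmin
    have hmle := PySem.List.min?_isMin hmin
    simp only [hmin]
    by_cases hm2 : m < 2
    · rw [if_pos hm2, List.all_eq_false]
      exact ⟨m, hmmem, by rw [if_pos hm2]; exact Bool.false_ne_true⟩
    · rw [if_neg hm2]
      cases hmax : PySem.List.max? diag (fun x => x) with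
      | none => exact absurd ((PySem.List.max?_eq_none_iff diag _).mp hmax) hdne
      | some mx =>
        have hmxle := PySem.List.max?_isMax hmax
        exact pv_all_congr diag _
          (fun v => ((pvPrimes (pvIsqrt mx)).filter (fun p => decide (p * p ≤ v))).all
            (fun p => !(PySem.Int.mod v p == 0)))
          (fun v hv => pv_elem_eq mx v (by have := hmle v hv; simp at this; omega) (hmxle v hv))
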